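-- pv_equiv track=rewrite | github.com/AsenAsenov1/SoftUni-Programming-Fundamentals-with-Python-September-2022 | 23_text_processing_exercise/02_character_multiplier.py | char_multiplier
-- ===== SOURCE A (Python) =====
-- def char_multiplier(text: list):
--     number = 0
--     short_word, long_word = sorted(text, key=lambda x: len(x))
--
--     if len(short_word) != len(long_word):
--         for char in range(len(long_word)):
--             if char < len(short_word):
--                 number += ord(short_word[char]) * ord(long_word[char])
--             else:
--                 number += ord(long_word[char])
--         return number
--     else:
--         for char in range(len(long_word)):
--             number += ord(short_word[char]) * ord(long_word[char])
--         return number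
-- ===== SOURCE B (Python) =====
-- def char_multiplier(text: list):
--     first, second = text
--
--     def go(xs, ys):
--         if not xs:
--             return sum(map(ord, ys))
--         if not ys:
--             return sum(map(ord, xs))
--         return ord(xs[0]) * ord(ys[0]) + go(xs[1:], ys[1:])
--
--     return go(first, second)
-- ===== Notes on version B (the rewrite author's own statement) =====
-- stated objective: alternative
-- what changed: Drops A's length-sort and indexed-loop-with-branch entirely: B unpacks the two words in given order and recursively consumes both at once, pairing heads while both are non-empty and summing the leftover word's ordinals when one runs out; correctness uses commutativity of multiplication, so no short/long sorting is needed.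
import Mathlib
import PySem

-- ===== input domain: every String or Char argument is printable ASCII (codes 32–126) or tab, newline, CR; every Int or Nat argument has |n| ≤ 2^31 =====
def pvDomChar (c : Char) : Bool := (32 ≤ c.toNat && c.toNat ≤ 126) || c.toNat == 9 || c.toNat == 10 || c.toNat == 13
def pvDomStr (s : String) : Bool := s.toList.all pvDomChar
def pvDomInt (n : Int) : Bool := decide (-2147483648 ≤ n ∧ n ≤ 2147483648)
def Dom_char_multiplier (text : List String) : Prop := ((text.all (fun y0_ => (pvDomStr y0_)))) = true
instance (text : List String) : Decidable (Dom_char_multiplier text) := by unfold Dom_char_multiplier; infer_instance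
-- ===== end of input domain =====

-- B drops A's length-sort and branched index loop: it recursively consumes both words in
-- given order at once (correct because multiplication is commutative); objective: alternative.

-- ===== PORT A =====
def char_multiplier (text : List String) : Int :=
  match PySem.List.sorted text (fun s => (s.length : Int)) false with
  | [sw, lw] =>
    let s := sw.toList
    let l := lw.toList
    if s.length ≠ l.length then
      (List.range l.length).foldl (fun n i =>
        if i < s.length then n + (s.getD i ' ').toNat * (l.getD i ' ').toNat
        else n + ((l.getD i ' ').toNat : Int)) 0
    else
      (List.range l.length).foldl (fun n i =>
        n + (s.getD i ' ').toNat * (l.getD i ' ').toNat) 0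
  | _ => 0  -- unreachable under Pre_: Python raises ValueError on unpacking

-- ===== PORT B =====
-- Source B's inner recursion go(xs, ys): pair heads while both non-empty, else sum the leftover.
def charMultGo : List Char → List Char → Int
  | [], ys => (ys.map (fun c => ((c.toNat : Nat) : Int))).sum
  | x :: xs, [] => ((x :: xs).map (fun c => ((c.toNat : Nat) : Int))).sum
  | x :: xs, y :: ys => ((x.toNat * y.toNat : Nat) : Int) + charMultGo xs ys

def char_multiplier_alt (text : List String) : Int :=
  match text with
  | first :: second :: [] => charMultGo first.toList second.toList
  | [] => 0        -- unreachable under Pre_: Python raises ValueError on unpacking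
  | [_] => 0       -- unreachable under Pre_
  | _ :: _ :: _ :: _ => 0  -- unreachable under Pre_

-- ===== PRECONDITION & SPEC =====
-- Python A raises ValueError unless the list has exactly two elements (the two-name unpacking).
def Pre_char_multiplier (text : List String) : Prop := text.length = 2
instance (text : List String) : Decidable (Pre_char_multiplier text) := by unfold Pre_char_multiplier; infer_instance
def pvWitness_char_multiplier : List String := ["ab", "cde"]

def Spec_char_multiplier (text : List String) (out : Int) : Prop := out = char_multiplier_alt text
instance (text : List String) (out : Int) : Decidable (Spec_char_multiplier text out) := by unfold Spec_char_multiplier; infer_instance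

-- ===== CLAIM (what is proved, stated in full; the proofs are below) =====
def Claim_equal_char_multiplier : Prop := ∀ (text : List String), Dom_char_multiplier text → Pre_char_multiplier text → Spec_char_multiplier text (char_multiplier text)

-- ===== LEMMAS AND PROOFS =====

-- sorted of a two-element list by an Int-valued key.
theorem sorted_pair (a b : String) (k : String → Int) :
    PySem.List.sorted [a, b] k false = if k b < k a then [b, a] else [a, b] := by
  rw [PySem.List.sorted_eq_foldl_insertBy]
  simp [PySem.List.insertBy]

-- B's recursion equals the paired-product sum plus the leftover ordinals of either side.
theorem charMultGo_eq (xs : List Char) : ∀ (ys : List Char),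
    charMultGo xs ys
      = ((xs.zip ys).map (fun p => ((p.1.toNat * p.2.toNat : Nat) : Int))).sum
        + ((ys.drop xs.length).map (fun c => ((c.toNat : Nat) : Int))).sum
        + ((xs.drop ys.length).map (fun c => ((c.toNat : Nat) : Int))).sum := by
  induction xs with
  | nil => intro ys; simp [charMultGo]
  | cons x xs ih =>
    intro ys
    cases ys with
    | nil => simp [charMultGo]
    | cons y ys =>
      simp only [charMultGo, ih ys, List.zip_cons_cons, List.map_cons, List.sum_cons,
        List.length_cons, List.drop_succ_cons]
      ring

-- the paired-product sum is symmetric (mul_comm, zip swap).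
theorem zipsum_comm (xs : List Char) : ∀ (ys : List Char),
    ((xs.zip ys).map (fun p => ((p.1.toNat * p.2.toNat : Nat) : Int))).sum
      = ((ys.zip xs).map (fun p => ((p.1.toNat * p.2.toNat : Nat) : Int))).sum := by
  induction xs with
  | nil => intro ys; simp
  | cons x xs ih =>
    intro ys
    cases ys with
    | nil => simp
    | cons y ys =>
      simp only [List.zip_cons_cons, List.map_cons, List.sum_cons, ih ys]
      push_cast
      ring

-- A's indexed loop with the per-index length branch equals zip-sum plus tail-sum.
theorem loop_branch_eq (l : List Char) : ∀ (s : List Char) (acc : Int),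
    (List.range l.length).foldl (fun (n : Int) i =>
        if i < s.length then n + (s.getD i ' ').toNat * (l.getD i ' ').toNat
        else n + ((l.getD i ' ').toNat : Int)) acc
    = acc + ((s.zip l).map (fun p => ((p.1.toNat * p.2.toNat : Nat) : Int))).sum
        + ((l.drop s.length).map (fun c => ((c.toNat : Nat) : Int))).sum := by
  induction l with
  | nil => intro s acc; simp
  | cons c l ih =>
    intro s acc
    rw [show (c :: l).length = l.length + 1 from rfl, List.range_succ_eq_map,
        List.foldl_cons, List.foldl_map]
    cases s with
    | nil =>
      have h := ih [] (acc + (c.toNat : Int))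
      simp only [List.length_nil, Nat.not_lt_zero, if_false, List.getD_cons_succ,
        List.zip_nil_left, List.map_nil, List.sum_nil, List.drop_zero, List.getD_cons_zero,
        List.map_cons, List.sum_cons] at h ⊢
      rw [h]; ring
    | cons d s =>
      have h := ih s (acc + ((d.toNat * c.toNat : Nat) : Int))
      simp only [List.getD_cons_succ, List.length_cons, Nat.succ_lt_succ_iff,
        List.getD_cons_zero, Nat.succ_pos, if_pos, List.zip_cons_cons, List.map_cons,
        List.sum_cons, List.drop_succ_cons] at *
      push_cast at h ⊢
      rw [h]; ring

-- A's unbranched equal-length loop equals the zip-sum (the tail is empty).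
theorem loop_plain_eq (l : List Char) : ∀ (s : List Char) (acc : Int), s.length = l.length →
    (List.range l.length).foldl (fun (n : Int) i =>
        n + (s.getD i ' ').toNat * (l.getD i ' ').toNat) acc
    = acc + ((s.zip l).map (fun p => ((p.1.toNat * p.2.toNat : Nat) : Int))).sum := by
  induction l with
  | nil => intro s acc _; simp
  | cons c l ih =>
    intro s acc hlen
    cases s with
    | nil => simp at hlen
    | cons d s =>
      rw [show (c :: l).length = l.length + 1 from rfl, List.range_succ_eq_map,
          List.foldl_cons, List.foldl_map]
      have h := ih s (acc + ((d.toNat * c.toNat : Nat) : Int)) (by simpa using hlen)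
      simp only [List.getD_cons_succ, List.getD_cons_zero, List.zip_cons_cons,
        List.map_cons, List.sum_cons] at *
      push_cast at h ⊢
      rw [h]; ring

-- ===== VERDICT (by name: the statement is the Claim_ definition above) =====
theorem char_multiplier_spec : Claim_equal_char_multiplier := by
  intro text _ hpre
  obtain ⟨a, b, htext⟩ := List.length_eq_two.mp hpre
  subst htext
  unfold Spec_char_multiplier char_multiplier char_multiplier_alt
  rw [sorted_pair]
  have hlb : (b.toList.length : Int) = (b.length : Int) := by simp
  have hla : (a.toList.length : Int) = (a.length : Int) := by simp
  by_cases hcmp : (b.length : Int) < (a.length : Int)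
  · rw [if_pos hcmp]
    simp only
    have hne : b.toList.length ≠ a.toList.length := by
      simp only [String.length_toList]; omega
    rw [if_pos hne, loop_branch_eq, charMultGo_eq, zipsum_comm]
    have hdrop : b.toList.drop a.toList.length = [] := by
      apply List.drop_eq_nil_of_le
      simp only [String.length_toList]; omega
    rw [hdrop]
    simp only [List.map_nil, List.sum_nil]
    ring
  · rw [if_neg hcmp]
    simp only
    rw [charMultGo_eq]
    have hle : a.toList.length ≤ b.toList.length := by
      simp only [String.length_toList]; omega
    have hdrop : a.toList.drop b.toList.length = [] := List.drop_eq_nil_of_le hle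
    rw [hdrop]
    simp only [List.map_nil, List.sum_nil, add_zero]
    by_cases hne : a.toList.length ≠ b.toList.length
    · rw [if_pos hne, loop_branch_eq]; ring
    · rw [if_neg hne, loop_plain_eq b.toList a.toList 0 (by omega)]
      have hd : b.toList.drop a.toList.length = [] := by
        apply List.drop_eq_nil_of_le; omega
      rw [hd]; simp
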